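-- pv_equiv track=rewrite | github.com/Hackin7/Programming-Crappy-Solutions | School Exercises/2. NYJC A Level Computing 2019-2020/Practicals/Practical7.py | tokenising
-- ===== SOURCE A (Python) =====
-- def nearestNonWhitespace(text, index, step = 1):
--     index -= 1
--     while 0 <= index < len(text): #Loop through indexes
--         if text[index] != " ":
--             return index
--         index += step
--     return -1 #Cannot Find
--
-- def isOperator(text, index):
--     charBefore = nearestNonWhitespace(text, index, -1)
--     if charBefore == -1: #If reached front of text
--         return False
--     return text[charBefore].isdigit() or text[charBefore] == ")"
--
-- def findNearNumbers(text, char):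
--     number = text[char]
--     stop = False
--     char += 1 #Move to next character
--     while char < len(text) and not stop:
--         if text[char] == " ":
--             char += 1
--         elif (not text[char].isdigit()): #end of number
--             stop = True
--             char -= 1
--         elif text[char].isdigit():
--             number += text[char] #Add to number
--             char += 1
--     return number,char
--
-- def tokenising(text):
--     additionSubtraction = ["+","-"]
--     operators = ["*","/","^"]
--     parenthesis = ["(",")"]
--     listOfTokens = []
--
--     char = 0 #Character index
--     while char < len(text): #Loop Through all characters
--         ###Operator and Parenthesis#####################################
--         if text[char] in operators or text[char] in parenthesis:
--             listOfTokens.append(text[char])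
--
--         ###For numbers##################################################
--         elif text[char].isdigit():
--             #Find all nearby numbers and concatnate together
--             info = findNearNumbers(text, char)
--             char = info[1]
--             listOfTokens.append(info[0])
--
--         ###Addition Subtraction Operator################################
--         elif text[char] in additionSubtraction:
--
--             if isOperator(text, char):
--                 listOfTokens.append(text[char])
--
--             else: #Part of number token
--                 #Find all nearby numbers and concatnate together
--                 info = findNearNumbers(text, char)
--                 char = info[1]
--                 listOfTokens.append(info[0])
--
--         ################################################################
--         char += 1 #Move on to next character
--     return listOfTokens
-- ===== SOURCE B (Python) =====
-- def tokenising(text):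
--     # One forward pass tracking the last non-space character seen (prev),
--     # instead of A's backward rescans and helper calls.
--     tokens = []
--     prev = ""  # last non-space character before position i ("" if none)
--     i, n = 0, len(text)
--     while i < n:
--         c = text[i]
--         if c in "*/^()":
--             tokens.append(c)
--             prev = c
--             i += 1
--         elif c.isdigit() or (c in "+-" and not (prev.isdigit() or prev == ")")):
--             # number token: c plus following digits, spaces inside skipped
--             num = c
--             i += 1
--             while i < n and (text[i] == " " or text[i].isdigit()):
--                 if text[i] != " ":
--                     num += text[i]
--                 i += 1
--             tokens.append(num)
--             prev = num[-1]
--         elif c in "+-":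
--             tokens.append(c)
--             prev = c
--             i += 1
--         else:
--             if c != " ":
--                 prev = c
--             i += 1
--     return tokens
-- ===== Notes on version B (the rewrite author's own statement) =====
-- stated objective: faster
-- what changed: Replaces A's per-sign backward rescan (nearestNonWhitespace/isOperator) and separate number-scan helper calls by a single forward pass that tracks the last non-space character seen so far, classifying sign characters in O(1).
import Mathlib
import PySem

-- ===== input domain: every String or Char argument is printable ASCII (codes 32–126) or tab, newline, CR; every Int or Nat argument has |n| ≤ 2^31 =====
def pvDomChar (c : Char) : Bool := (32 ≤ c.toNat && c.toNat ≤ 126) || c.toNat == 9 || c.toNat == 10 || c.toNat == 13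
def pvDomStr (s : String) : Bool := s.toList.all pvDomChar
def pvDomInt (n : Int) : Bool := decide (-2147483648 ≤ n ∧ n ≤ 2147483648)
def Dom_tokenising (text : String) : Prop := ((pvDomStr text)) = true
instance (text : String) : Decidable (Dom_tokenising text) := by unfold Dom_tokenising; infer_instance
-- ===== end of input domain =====

-- B replaces A's backward rescans (nearestNonWhitespace/isOperator helpers) by one forward pass
-- that tracks the last non-space character seen; same return value on every input.

-- ===== PORT A =====
-- while-loop of nearestNonWhitespace; fuel is a totality guard only: at every call site step = -1,
-- so the Python loop runs at most cs.length + 1 times and the fuel is never exhausted.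
def nnwsAux (cs : List Char) (index step : Int) (fuel : Nat) : Int :=
  match fuel with
  | 0 => -1
  | fuel + 1 =>
    if 0 ≤ index ∧ index < (cs.length : Int) then
      if cs.getD index.toNat ' ' ≠ ' ' then index
      else nnwsAux cs (index + step) step fuel
    else -1

def nearestNonWhitespace (cs : List Char) (index : Int) (step : Int) : Int :=
  nnwsAux cs (index - 1) step (cs.length + 1)

def isOperator (cs : List Char) (index : Int) : Bool :=
  let charBefore := nearestNonWhitespace cs index (-1)
  if charBefore == -1 then false
  else PySem.Chars.isdigit (cs.getD charBefore.toNat ' ') || cs.getD charBefore.toNat ' ' == ')'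

-- while-loop of findNearNumbers ('stop = True; char -= 1' exits the loop, so it is a return);
-- fuel guard only: char increases every iteration, at most cs.length + 1 steps.
def fnnAux (cs : List Char) (number : List Char) (char : Int) (fuel : Nat) : List Char × Int :=
  match fuel with
  | 0 => (number, char)
  | fuel + 1 =>
    if char < (cs.length : Int) then
      let c := cs.getD char.toNat ' '
      if c == ' ' then fnnAux cs number (char + 1) fuel
      else if ¬ PySem.Chars.isdigit c then (number, char - 1)
      else fnnAux cs (number ++ [c]) (char + 1) fuel
    else (number, char)

def findNearNumbers (cs : List Char) (char : Int) : List Char × Int :=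
  fnnAux cs [cs.getD char.toNat ' '] (char + 1) (cs.length + 1)

-- main while-loop; fuel guard only: char strictly increases each iteration.
def tokAux (cs : List Char) (tokens : List String) (char : Int) (fuel : Nat) : List String :=
  match fuel with
  | 0 => tokens
  | fuel + 1 =>
    if char < (cs.length : Int) then
      let c := cs.getD char.toNat ' '
      if c == '*' || c == '/' || c == '^' || c == '(' || c == ')' then
        tokAux cs (tokens ++ [String.ofList [c]]) (char + 1) fuel
      else if PySem.Chars.isdigit c then
        let info := findNearNumbers cs char
        tokAux cs (tokens ++ [String.ofList info.1]) (info.2 + 1) fuel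
      else if c == '+' || c == '-' then
        if isOperator cs char then
          tokAux cs (tokens ++ [String.ofList [c]]) (char + 1) fuel
        else
          let info := findNearNumbers cs char
          tokAux cs (tokens ++ [String.ofList info.1]) (info.2 + 1) fuel
      else
        tokAux cs tokens (char + 1) fuel
    else tokens

def tokenising (text : String) : List String :=
  tokAux text.toList [] 0 (text.toList.length + 1)

-- ===== PORT B =====
-- inner while-loop of Source B's number branch, as recursion on the remaining suffix
def scanNum (rest : List Char) (num : List Char) : List Char × List Char :=
  match rest with
  | [] => (num, [])
  | c :: rs =>
    if c == ' ' then scanNum rs num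
    else if PySem.Chars.isdigit c then scanNum rs (num ++ [c])
    else (num, c :: rs)

-- termination measure for tokAltAux: scanNum never grows the remaining suffix
theorem scanNum_len_le (rest : List Char) : ∀ num, (scanNum rest num).2.length ≤ rest.length := by
  induction rest with
  | nil => intro num; simp [scanNum]
  | cons c rs ih =>
    intro num
    simp only [scanNum]
    split_ifs with h1 h2 <;> simp <;> exact Nat.le_succ_of_le (ih _)

-- Source B's main loop over the suffix; prev = last non-space char seen ("" / [] if none).
-- (res.1).getLastD ' ' is Python's num[-1]: res.1 starts from [c] and only grows, so it is never [].
def tokAltAux (rest : List Char) (prev : List Char) (tokens : List String) : List String :=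
  match rest with
  | [] => tokens
  | c :: rs =>
    if c == '*' || c == '/' || c == '^' || c == '(' || c == ')' then
      tokAltAux rs [c] (tokens ++ [String.ofList [c]])
    else if PySem.Chars.isdigit c
            || ((c == '+' || c == '-') && !(PySem.Chars.strIsdigit prev || prev == [')'])) then
      let res := scanNum rs [c]
      tokAltAux res.2 [(res.1).getLastD ' '] (tokens ++ [String.ofList res.1])
    else if c == '+' || c == '-' then
      tokAltAux rs [c] (tokens ++ [String.ofList [c]])
    else
      tokAltAux rs (if c ≠ ' ' then [c] else prev) tokens
termination_by rest.length
decreasing_by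
  all_goals first
    | exact Nat.lt_succ_of_le (scanNum_len_le rs [c])
    | simp

def tokenising_alt (text : String) : List String :=
  tokAltAux text.toList [] []

-- ===== PRECONDITION & SPEC =====
def Spec_tokenising (text : String) (out : List String) : Prop := out = tokenising_alt text
instance (text : String) (out : List String) : Decidable (Spec_tokenising text out) := by unfold Spec_tokenising; infer_instance

-- ===== CLAIM (what is proved, stated in full; the proofs are below) =====
def Claim_equal_tokenising : Prop := ∀ (text : String), Dom_tokenising text → Spec_tokenising text (tokenising text)

-- ===== LEMMAS AND PROOFS =====

-- B's prev after processing a prefix: last non-space char, as [] or a singleton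
def prevStep (p : List Char) (c : Char) : List Char := if c = ' ' then p else [c]
def prevOf (l : List Char) : List Char := l.foldl prevStep []
def qual (prev : List Char) : Bool := PySem.Chars.strIsdigit prev || prev == [')']

theorem prevOf_append (a b : List Char) : prevOf (a ++ b) = b.foldl prevStep (prevOf a) := by
  simp [prevOf, List.foldl_append]

theorem prevOf_take_succ (cs : List Char) (i : Nat) (h : i < cs.length) :
    prevOf (cs.take (i+1)) = if cs[i] = ' ' then prevOf (cs.take i) else [cs[i]] := by
  rw [List.take_add_one, List.getElem?_eq_getElem h]
  simp only [Option.toList_some, prevOf_append, List.foldl_cons, List.foldl_nil, prevStep]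

-- A's backward scan finds exactly B's prev: nothing, or the last non-space char of the prefix
theorem nnws_val (cs : List Char) :
    ∀ (i fuel : Nat), i ≤ cs.length → i ≤ fuel →
    (nnwsAux cs ((i : Int) - 1) (-1) fuel = -1 ∧ prevOf (cs.take i) = []) ∨
    (∃ j : Nat, j < cs.length ∧ nnwsAux cs ((i : Int) - 1) (-1) fuel = (j : Int) ∧
      prevOf (cs.take i) = [cs.getD j ' ']) := by
  intro i
  induction i with
  | zero =>
    intro fuel _ _
    left
    refine ⟨?_, by simp [prevOf]⟩
    cases fuel with
    | zero => rfl
    | succ f => rw [nnwsAux, if_neg (by omega)]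
  | succ i ih =>
    intro fuel h1 h2
    obtain ⟨f, rfl⟩ : ∃ f, fuel = f + 1 := ⟨fuel - 1, by omega⟩
    have hlt : i < cs.length := by omega
    have hidx : ((i + 1 : Nat) : Int) - 1 = (i : Nat) := by push_cast; ring
    rw [hidx, nnwsAux,
        if_pos (⟨by omega, by exact_mod_cast hlt⟩ : 0 ≤ (i : Int) ∧ (i : Int) < (cs.length : Int))]
    rw [prevOf_take_succ cs i hlt]
    by_cases hsp : cs[i] = ' '
    · rw [if_neg (by simp [List.getElem?_eq_getElem hlt, hsp]), if_pos hsp,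
          show (i : Int) + -1 = (i : Int) - 1 from by ring]
      exact ih f (by omega) (by omega)
    · rw [if_pos (by simp [List.getElem?_eq_getElem hlt, hsp]), if_neg hsp]
      exact Or.inr ⟨i, hlt, rfl,
        by simp [List.getD_eq_getElem?_getD, List.getElem?_eq_getElem hlt]⟩

theorem isOperator_eq (cs : List Char) (i : Nat) (h : i ≤ cs.length) :
    isOperator cs (i : Int) = qual (prevOf (cs.take i)) := by
  rcases nnws_val cs i (cs.length + 1) h (by omega) with ⟨hv, hp⟩ | ⟨j, hj, hv, hp⟩
  · simp [isOperator, nearestNonWhitespace, hv, hp, qual, PySem.Chars.strIsdigit]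
  · have hne : ¬ ((j : Int) == -1) = true := by simp
    simp only [isOperator, nearestNonWhitespace, hv, hne, if_false, Bool.false_eq_true, hp]
    simp [qual, PySem.Chars.strIsdigit]

-- structure of B's number scan
theorem scan_decomp (rest : List Char) : ∀ (num : List Char),
    ∃ mid, rest = mid ++ (scanNum rest num).2 ∧
      (scanNum rest num).1 = num ++ mid.filter (PySem.Chars.isdigit ·) ∧
      (∀ x ∈ mid, x = ' ' ∨ PySem.Chars.isdigit x = true) := by
  induction rest with
  | nil => intro num; exact ⟨[], by simp [scanNum]⟩
  | cons c rs ih =>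
    intro num
    by_cases hsp : c = ' '
    · obtain ⟨mid, h1, h2, h3⟩ := ih num
      refine ⟨c :: mid, ?_, ?_, ?_⟩
      · rw [scanNum, if_pos (by simp [hsp])]
        simpa using h1
      · simp [scanNum, hsp, List.filter, show PySem.Chars.isdigit ' ' = false from rfl]; exact h2
      · intro x hx; rcases hx with _ | hx
        · left; exact hsp
        · exact h3 x (by assumption)
    · by_cases hd : PySem.Chars.isdigit c = true
      · obtain ⟨mid, h1, h2, h3⟩ := ih (num ++ [c])
        refine ⟨c :: mid, ?_, ?_, ?_⟩
        · simp [scanNum, hsp, hd]; exact h1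
        · simp [scanNum, hsp, hd, List.filter]; simpa using h2
        · intro x hx; rcases hx with _ | hx
          · right; exact hd
          · exact h3 x (by assumption)
      · exact ⟨[], by simp [scanNum, hsp, hd]⟩

-- A's number scan equals B's, the returned index expressed through the remaining suffix
theorem scan_eq (cs : List Char) :
    ∀ (fuel j : Nat) (num : List Char), j ≤ cs.length → cs.length - j < fuel →
    fnnAux cs num (j : Int) fuel =
      ((scanNum (cs.drop j) num).1,
       if (scanNum (cs.drop j) num).2 = [] then (cs.length : Int)
       else (cs.length : Int) - (scanNum (cs.drop j) num).2.length - 1) := by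
  intro fuel
  induction fuel with
  | zero => intro j num h1 h2; omega
  | succ f ih =>
    intro j num hj hf
    by_cases hlt : j < cs.length
    · have hdrop : cs.drop j = cs[j] :: cs.drop (j + 1) := List.drop_eq_getElem_cons hlt
      have hgd : cs.getD ((j : Int)).toNat ' ' = cs[j] := by
        simp [List.getD_eq_getElem?_getD, hlt]
      have hcast : ((j : Int) + 1) = ((j + 1 : Nat) : Int) := by push_cast; ring
      rw [fnnAux]
      rw [if_pos (by exact_mod_cast hlt)]
      simp only [hgd, hdrop, scanNum]
      by_cases hsp : cs[j] = ' '
      · have bsp : (cs[j] == ' ') = true := by simp [hsp]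
        simp only [bsp, if_true, hcast]
        exact ih (j+1) num (by omega) (by omega)
      · have bsp : (cs[j] == ' ') = false := by simp [hsp]
        by_cases hd : PySem.Chars.isdigit cs[j] = true
        · simp only [bsp, hd, Bool.false_eq_true, if_false, if_true, not_true, hcast]
          exact ih (j+1) (num ++ [cs[j]]) (by omega) (by omega)
        · have bd : PySem.Chars.isdigit cs[j] = false := by simpa using hd
          simp only [bsp, bd, Bool.false_eq_true, if_false, not_false_iff, reduceIte]
          rw [if_neg (List.cons_ne_nil _ _)]
          refine Prod.ext rfl ?_
          have hlen : (cs.drop (j+1)).length = cs.length - (j+1) := by simp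
          simp only [List.length_cons, hlen]
          push_cast [Nat.sub_add_cancel (by omega : 1 ≤ cs.length - j)]
          omega
    · have hj' : j = cs.length := by omega
      subst hj'
      rw [fnnAux, if_neg (by exact lt_irrefl _)]
      simp [scanNum]

-- B's prev after a number token is its last character
theorem foldl_prev (mid : List Char) : ∀ (c : Char) (p : List Char), c ≠ ' ' →
    (∀ x ∈ mid, x = ' ' ∨ PySem.Chars.isdigit x = true) →
    List.foldl prevStep p (c :: mid) = [(c :: mid.filter (PySem.Chars.isdigit ·)).getLastD ' '] := by
  induction mid with
  | nil => intro c p hc _; simp [prevStep, hc]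
  | cons x t ih =>
    intro c p hc hall
    rcases hall x (by simp) with hx | hx
    · have : List.foldl prevStep p (c :: x :: t) = List.foldl prevStep p (c :: t) := by
        simp [List.foldl, prevStep, hc, hx]
      rw [this, ih c p hc (fun y hy => hall y (by simp [hy]))]
      simp [hx, List.filter, show PySem.Chars.isdigit ' ' = false from rfl]
    · have hxs : x ≠ ' ' := by
        intro h; rw [h] at hx; simp [PySem.Chars.isdigit] at hx
      have : List.foldl prevStep p (c :: x :: t) = List.foldl prevStep (prevStep p c) (x :: t) := rfl
      rw [this, ih x (prevStep p c) hxs (fun y hy => hall y (by simp [hy]))]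
      simp [List.filter, hx]

-- the number branch: A's findNearNumbers jump lands where B's scanNum continues
theorem num_branch (cs : List Char) (f i : Nat) (tokens : List String)
    (hlt : i < cs.length) (hf : cs.length - i < f + 1) (hc : cs[i] ≠ ' ')
    (ih : ∀ (i' : Nat) (tokens : List String), i' ≤ cs.length → cs.length - i' < f →
      tokAux cs tokens (i' : Int) f = tokAltAux (cs.drop i') (prevOf (cs.take i')) tokens) :
    tokAux cs (tokens ++ [String.ofList (findNearNumbers cs (i : Int)).1])
      ((findNearNumbers cs (i : Int)).2 + 1) f
    = tokAltAux (scanNum (cs.drop (i+1)) [cs[i]]).2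
        [((scanNum (cs.drop (i+1)) [cs[i]]).1).getLastD ' ']
        (tokens ++ [String.ofList (scanNum (cs.drop (i+1)) [cs[i]]).1]) := by
  have hgd : cs.getD ((i : Int)).toNat ' ' = cs[i] := by
    simp [List.getD_eq_getElem?_getD, hlt]
  set res := scanNum (cs.drop (i+1)) [cs[i]] with hres
  have hfnn : findNearNumbers cs (i : Int)
      = (res.1, if res.2 = [] then (cs.length : Int)
                else (cs.length : Int) - res.2.length - 1) := by
    unfold findNearNumbers
    rw [hgd, show ((i : Int) + 1) = ((i + 1 : Nat) : Int) from by push_cast; ring]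
    exact scan_eq cs (cs.length + 1) (i+1) [cs[i]] (by omega) (by omega)
  obtain ⟨mid, hm1, hm2, hm3⟩ := scan_decomp (cs.drop (i+1)) [cs[i]]
  rw [← hres] at hm1 hm2
  have hmlen : cs.length - (i+1) = mid.length + res.2.length := by
    have := congrArg List.length hm1
    simpa using this
  cases hr2 : res.2 with
  | nil =>
    rw [hfnn, hr2]
    rw [if_pos rfl]
    cases f with
    | zero => simp [tokAux, tokAltAux]
    | succ f' =>
      rw [tokAux, if_neg (by push_cast; omega)]
      simp [tokAltAux]
  | cons d t =>
    rw [hfnn, hr2]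
    rw [if_neg (List.cons_ne_nil _ _)]
    have hlen : res.2.length ≤ cs.length - (i+1) := by omega
    have hi' : cs.length - res.2.length = (i+1) + mid.length := by
      rw [hr2] at hmlen hlen ⊢; omega
    have hidx : ((cs.length : Int) - ((d :: t).length : Int) - 1 + 1)
        = ((cs.length - res.2.length : Nat) : Int) := by
      rw [hr2]; rw [hr2] at hlen; omega
    rw [show ((cs.length : Int) - ((d :: t).length : Int) - 1 + 1)
          = ((cs.length - res.2.length : Nat) : Int) from hidx,
        ih (cs.length - res.2.length) _ (by omega) (by omega)]
    have hdrop' : cs.drop (cs.length - res.2.length) = res.2 := by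
      rw [hi', ← List.drop_drop, hm1, List.drop_left]
    have htake : cs.take (cs.length - res.2.length) = cs.take i ++ (cs[i] :: mid) := by
      have ht1 : cs.take (i+1) = cs.take i ++ [cs[i]] := by
        rw [List.take_add_one, List.getElem?_eq_getElem hlt]; simp
      rw [hi', List.take_add, hm1, List.take_left]
      rw [ht1]
      simp only [List.append_assoc, List.singleton_append]
    have hprev : prevOf (cs.take (cs.length - res.2.length)) = [res.1.getLastD ' '] := by
      rw [htake, prevOf_append, foldl_prev mid cs[i] _ hc hm3]
      congr 1
      rw [hm2]
      simp
    rw [hdrop', hprev, hr2]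

theorem main_eq (cs : List Char) :
    ∀ (fuel i : Nat) (tokens : List String), i ≤ cs.length → cs.length - i < fuel →
    tokAux cs tokens (i : Int) fuel = tokAltAux (cs.drop i) (prevOf (cs.take i)) tokens := by
  intro fuel
  induction fuel with
  | zero => intro i tokens h1 h2; omega
  | succ f ih =>
    intro i tokens hi hf
    by_cases hlt : i < cs.length
    case neg =>
      have hi' : i = cs.length := by omega
      subst hi'
      rw [tokAux, if_neg (lt_irrefl _)]
      simp [tokAltAux]
    case pos =>
      have hdrop : cs.drop i = cs[i] :: cs.drop (i + 1) := List.drop_eq_getElem_cons hlt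
      have hgd : cs.getD ((i : Int)).toNat ' ' = cs[i] := by
        simp [List.getD_eq_getElem?_getD, hlt]
      have hcast : ((i : Int) + 1) = ((i + 1 : Nat) : Int) := by push_cast; ring
      rw [tokAux, if_pos (by exact_mod_cast hlt), hdrop, tokAltAux]
      simp only [hgd]
      by_cases hop : (cs[i] == '*' || cs[i] == '/' || cs[i] == '^' || cs[i] == '(' || cs[i] == ')') = true
      · have hcsp : cs[i] ≠ ' ' := by
          simp only [Bool.or_eq_true, beq_iff_eq] at hop
          rcases hop with ((((h|h)|h)|h)|h) <;> simp [h]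
        rw [if_pos hop, if_pos hop, hcast, ih (i+1) _ (by omega) (by omega),
            prevOf_take_succ cs i hlt, if_neg hcsp]
      · rw [if_neg hop, if_neg hop]
        by_cases hd : PySem.Chars.isdigit cs[i] = true
        · have hcsp : cs[i] ≠ ' ' := by
            intro h; rw [h] at hd; exact absurd hd (by decide)
          rw [if_pos hd, if_pos (by simp [hd])]
          exact num_branch cs f i tokens hlt hf hcsp ih
        · have hbd : PySem.Chars.isdigit cs[i] = false := by simpa using hd
          rw [if_neg hd]
          by_cases hpm : (cs[i] == '+' || cs[i] == '-') = true
          · have hcsp : cs[i] ≠ ' ' := by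
              simp only [Bool.or_eq_true, beq_iff_eq] at hpm
              rcases hpm with h|h <;> simp [h]
            rw [if_pos hpm, isOperator_eq cs i (by omega)]
            by_cases hq : qual (prevOf (cs.take i)) = true
            · have hq2 : (PySem.Chars.strIsdigit (prevOf (cs.take i))
                  || prevOf (cs.take i) == [')']) = true := hq
              rw [if_pos hq]
              simp only [hbd, hq2, Bool.false_or, Bool.not_true, Bool.and_false,
                Bool.false_eq_true, if_false]
              rw [if_pos hpm, hcast, ih (i+1) _ (by omega) (by omega),
                  prevOf_take_succ cs i hlt, if_neg hcsp]
            · have hq0 : qual (prevOf (cs.take i)) = false := by simpa using hq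
              have hq2 : (PySem.Chars.strIsdigit (prevOf (cs.take i))
                  || prevOf (cs.take i) == [')']) = false := hq0
              rw [if_neg hq, if_pos (by simp [hbd, hq2, hpm])]
              exact num_branch cs f i tokens hlt hf hcsp ih
          · have hpm' : (cs[i] == '+' || cs[i] == '-') = false := by simpa using hpm
            rw [if_neg hpm]
            simp only [hbd, hpm', Bool.false_or, Bool.false_and, Bool.false_eq_true, if_false]
            rw [hcast, ih (i+1) _ (by omega) (by omega), prevOf_take_succ cs i hlt]
            by_cases hsp : cs[i] = ' ' <;> simp [hsp]

-- ===== VERDICT (by name: the statement is the Claim_ definition above) =====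
theorem tokenising_spec : Claim_equal_tokenising := by
  intro text _
  unfold Spec_tokenising tokenising tokenising_alt
  have h := main_eq text.toList (text.toList.length + 1) 0 [] (Nat.zero_le _) (by omega)
  simpa [prevOf] using h
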